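-- pv_equiv track=rewrite | github.com/saadrehman10/Compiler-Construction | split.py | arrayConcatenation
-- ===== SOURCE A (Python) =====
-- def arrayConcatenation(array):
--     index1 = 0
--     index2 = 1
--     for i in range(len(array)):
--         if index2 >= len(array):
--             break
--         if array[index1] == "=" and array[index2] == "=":
--             hold = array[index1] + array[index2]
--             array[index1] = hold
--             array.pop(index2)
--         else:
--             index1 += 1
--             index2 += 1
--
--     return array
-- ===== SOURCE B (Python) =====
-- def arrayConcatenation(array):
--     # Run-based rewrite: each maximal run of k '='s becomes k//2 '==' plus k%2 '=';
--     # other runs are copied unchanged. Mutates array in place like A and returns it.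
--     result = []
--     n = len(array)
--     i = 0
--     while i < n:
--         tok = array[i]
--         j = i
--         while j < n and array[j] == tok:
--             j += 1
--         k = j - i
--         if tok == "=":
--             result += ["=="] * (k // 2) + ["="] * (k % 2)
--         else:
--             result += [tok] * k
--         i = j
--     array[:] = result
--     return array
-- ===== Notes on version B (the rewrite author's own statement) =====
-- stated objective: alternative
-- what changed: Replaces A's in-place two-index scan with repeated pop() by a single pass that groups maximal runs of equal tokens and emits k//2 '==' plus k%2 '=' per '=' run, building a fresh list written back in place.
import Mathlib
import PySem

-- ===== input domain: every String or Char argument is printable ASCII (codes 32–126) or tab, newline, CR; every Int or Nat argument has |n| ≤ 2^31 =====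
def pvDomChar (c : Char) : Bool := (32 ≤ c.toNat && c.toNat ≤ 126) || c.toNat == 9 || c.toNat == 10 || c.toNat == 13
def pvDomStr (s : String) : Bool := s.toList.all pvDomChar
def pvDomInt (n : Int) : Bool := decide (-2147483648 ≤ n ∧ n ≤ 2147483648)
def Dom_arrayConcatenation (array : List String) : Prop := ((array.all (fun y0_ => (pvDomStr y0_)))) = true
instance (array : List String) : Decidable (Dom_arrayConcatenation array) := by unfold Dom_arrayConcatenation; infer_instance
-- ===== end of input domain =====

-- B rewrites A's two-index scan with repeated pop() as a single run-grouping pass;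
-- both Pythons mutate the argument in place identically, the theorems are about the return value.

-- ===== PORT A =====
-- Literal port of A's for-loop: fuel = range(len(array)); indices index1/index2 are
-- only ever read when index2 < len (and index1 < index2), hence getD is exact there.
def aLoop : Nat → List String → Nat → Nat → List String
  | 0, arr, _, _ => arr
  | f+1, arr, index1, index2 =>
    if index2 ≥ arr.length then arr
    else if arr.getD index1 "" = "=" ∧ arr.getD index2 "" = "=" then
      let hold := arr.getD index1 "" ++ arr.getD index2 ""
      aLoop f ((arr.set index1 hold).eraseIdx index2) index1 index2
    else
      aLoop f arr (index1+1) (index2+1)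

def arrayConcatenation (array : List String) : List String :=
  aLoop array.length array 0 1

-- ===== PORT B =====
-- Port of B: recursion over maximal runs of equal tokens (B's outer while loop);
-- the inner counting while loop is takeWhile/dropWhile on the same predicate.
def bGo : List String → List String
  | [] => []
  | x :: xs =>
    let k := 1 + (xs.takeWhile (fun y => y = x)).length
    let rest := xs.dropWhile (fun y => y = x)
    if x = "=" then
      List.replicate (k / 2) "==" ++ List.replicate (k % 2) "=" ++ bGo rest
    else
      List.replicate k x ++ bGo rest
  termination_by l => l.length
  decreasing_by
    all_goals exact Nat.lt_of_le_of_lt (List.length_dropWhile_le _ _) (by simp)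

def arrayConcatenation_alt (array : List String) : List String :=
  bGo array

-- ===== PRECONDITION & SPEC =====
def Spec_arrayConcatenation (array : List String) (out : List String) : Prop := out = arrayConcatenation_alt array
instance (array : List String) (out : List String) : Decidable (Spec_arrayConcatenation array out) := by unfold Spec_arrayConcatenation; infer_instance

-- ===== CLAIM (what is proved, stated in full; the proofs are below) =====
def Claim_equal_arrayConcatenation : Prop := ∀ (array : List String), Dom_arrayConcatenation array → Spec_arrayConcatenation array (arrayConcatenation array)

-- ===== LEMMAS AND PROOFS =====

-- Common characterisation: the one-step greedy left-to-right merger.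
def merge : List String → List String
  | [] => []
  | [x] => [x]
  | x :: y :: rest =>
    if x = "=" ∧ y = "=" then "==" :: merge rest else x :: merge (y :: rest)

theorem merge_cons_of_ne (x : String) (l : List String) (hx : x ≠ "=") :
    merge (x :: l) = x :: merge l := by
  cases l with
  | nil => simp [merge]
  | cons y t => simp [merge, hx]

theorem merge_short (l : List String) (h : l.length ≤ 1) : merge l = l := by
  match l with
  | [] => rfl
  | [x] => rfl
  | x :: y :: t => simp at h

-- A's loop equals take ++ merge ∘ drop, stated over the split arr = pre ++ rest.
theorem aLoop_eq (f : Nat) (pre rest : List String) (hf : f + 1 ≥ rest.length) :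
    aLoop f (pre ++ rest) pre.length (pre.length + 1) = pre ++ merge rest := by
  induction f generalizing pre rest with
  | zero =>
    have : rest.length ≤ 1 := by omega
    simp [aLoop, merge_short rest this]
  | succ f ih =>
    by_cases hlen : pre.length + 1 ≥ (pre ++ rest).length
    · have hr : rest.length ≤ 1 := by simp at hlen; omega
      simp only [aLoop, if_pos hlen, merge_short rest hr]
    · have hr2 : 2 ≤ rest.length := by simp at hlen ⊢; omega
      match rest, hr2 with
      | a :: b :: r, _ =>
        have hga : (pre ++ a :: b :: r).getD pre.length "" = a := by
          rw [List.getD_append_right _ _ _ _ (Nat.le_refl _)]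
          simp
        have hgb : (pre ++ a :: b :: r).getD (pre.length + 1) "" = b := by
          rw [List.getD_append_right _ _ _ _ (by omega)]
          have : pre.length + 1 - pre.length = 1 := by omega
          rw [this]
          rfl
        simp only [aLoop, if_neg hlen, hga, hgb]
        by_cases hab : a = "=" ∧ b = "="
        · rw [if_pos hab]
          obtain ⟨ha, hb⟩ := hab
          subst ha hb
          have hset : ((pre ++ "=" :: "=" :: r).set pre.length ("=" ++ "=")) =
              pre ++ "==" :: "=" :: r := by
            rw [List.set_append_right _ _ (Nat.le_refl _)]
            simp
          have herase : (pre ++ ("==" :: "=" :: r)).eraseIdx (pre.length + 1) =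
              pre ++ "==" :: r := by
            rw [List.eraseIdx_append_of_length_le (by omega)]
            have : pre.length + 1 - pre.length = 1 := by omega
            rw [this]
            rfl
          rw [hset, herase, ih pre ("==" :: r) (by simp at hf ⊢; omega)]
          rw [merge_cons_of_ne "==" r (by decide)]
          have : merge ("=" :: "=" :: r) = "==" :: merge r := by
            simp [merge]
          rw [this]
        · rw [if_neg hab]
          have harr : pre ++ a :: b :: r = (pre ++ [a]) ++ (b :: r) := by simp
          have hlen1 : pre.length + 1 = (pre ++ [a]).length := by simp
          rw [harr, hlen1, ih (pre ++ [a]) (b :: r) (by simp at hf ⊢; omega)]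
          have : merge (a :: b :: r) = a :: merge (b :: r) := by
            simp only [merge, if_neg hab]
          rw [this]
          simp

theorem arrayConcatenation_eq_merge (array : List String) :
    arrayConcatenation array = merge array := by
  have := aLoop_eq array.length [] array (by omega)
  simpa [arrayConcatenation] using this

-- run of "=": greedy pairing closed form
theorem merge_replicate_eq (k : Nat) (rest : List String)
    (hrest : ∀ c t, rest = c :: t → c ≠ "=") :
    merge (List.replicate k "=" ++ rest) =
      List.replicate (k / 2) "==" ++ List.replicate (k % 2) "=" ++ merge rest := by
  induction k using Nat.strong_induction_on with
  | _ k ih =>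
    match k with
    | 0 => simp
    | 1 =>
      cases rest with
      | nil => simp [merge]
      | cons c t =>
        have hc : c ≠ "=" := hrest c t rfl
        have : merge ("=" :: c :: t) = "=" :: merge (c :: t) := by
          simp only [merge]
          rw [if_neg (by tauto)]
        simp only [List.replicate_succ, List.replicate_zero, List.cons_append,
          List.nil_append, this]
        simp
    | (k+2) =>
      have hsplit : List.replicate (k+2) "=" ++ rest =
          "=" :: "=" :: (List.replicate k "=" ++ rest) := by
        simp [List.replicate_succ]
      rw [hsplit]
      have hm : merge ("=" :: "=" :: (List.replicate k "=" ++ rest)) =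
          "==" :: merge (List.replicate k "=" ++ rest) := by
        simp [merge]
      rw [hm, ih k (by omega)]
      have h2 : (k + 2) / 2 = k / 2 + 1 := by omega
      have h3 : (k + 2) % 2 = k % 2 := by omega
      rw [h2, h3]
      simp [List.replicate_succ]

theorem merge_replicate_ne (x : String) (hx : x ≠ "=") (k : Nat) (rest : List String) :
    merge (List.replicate k x ++ rest) = List.replicate k x ++ merge rest := by
  induction k with
  | zero => simp
  | succ k ih =>
    rw [List.replicate_succ, List.cons_append, merge_cons_of_ne x _ hx, ih]
    rfl

theorem takeWhile_eq_replicate (x : String) (xs : List String) :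
    xs.takeWhile (fun y => y = x) =
      List.replicate (xs.takeWhile (fun y => y = x)).length x := by
  rw [List.eq_replicate_iff]
  refine ⟨rfl, fun b hb => ?_⟩
  have := List.mem_takeWhile_imp hb
  simpa using this

theorem dropWhile_head_false {α : Type} (p : α → Bool) (l : List α) (c : α) (t : List α)
    (h : l.dropWhile p = c :: t) : p c = false := by
  induction l with
  | nil => simp [List.dropWhile] at h
  | cons a l' ih =>
    by_cases hp : p a = true
    · rw [List.dropWhile_cons_of_pos hp] at h
      exact ih h
    · rw [List.dropWhile_cons_of_neg hp] at h
      cases h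
      simpa using hp

theorem run_split (x : String) (xs : List String) :
    x :: xs = List.replicate (1 + (xs.takeWhile (fun y => y = x)).length) x ++
      xs.dropWhile (fun y => y = x) := by
  calc x :: xs
      = x :: (xs.takeWhile (fun y => y = x) ++ xs.dropWhile (fun y => y = x)) := by
        rw [List.takeWhile_append_dropWhile]
    _ = _ := by
        conv_lhs => rw [takeWhile_eq_replicate x xs]
        rw [Nat.add_comm, List.replicate_succ, List.cons_append]

theorem bGo_eq_merge_bounded : ∀ (n : Nat) (l : List String), l.length ≤ n →
    bGo l = merge l := by
  intro n
  induction n with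
  | zero =>
    intro l hl
    have : l = [] := by cases l <;> simp_all
    subst this
    simp [bGo, merge]
  | succ n ih =>
    intro l hl
    cases l with
    | nil => simp [bGo, merge]
    | cons x xs =>
      rw [bGo]
      have hrl : (xs.dropWhile (fun y => y = x)).length ≤ n := by
        have := List.length_dropWhile_le (fun y => decide (y = x)) xs
        simp at hl
        omega
      rw [ih _ hrl]
      by_cases hx : x = "="
      · rw [if_pos hx]
        subst hx
        conv_rhs => rw [run_split "=" xs]
        rw [merge_replicate_eq]
        intro c t hct
        have := dropWhile_head_false _ xs c t hct
        simpa using this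
      · rw [if_neg hx]
        conv_rhs => rw [run_split x xs]
        rw [merge_replicate_ne x hx]

-- ===== VERDICT (by name: the statement is the Claim_ definition above) =====
theorem arrayConcatenation_spec : Claim_equal_arrayConcatenation := by
  intro array _
  unfold Spec_arrayConcatenation arrayConcatenation_alt
  rw [arrayConcatenation_eq_merge, bGo_eq_merge_bounded array.length array (Nat.le_refl _)]
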